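-- pv_equiv track=rewrite | github.com/chakravarthiBagula/TicTacToe_AI | Tic_Tac_Toe_AI.py | calculateCol
-- ===== SOURCE A (Python) =====
-- def calculateCol(board, pos, player):
--     y = pos[1]
--     col = [board[0][y], board[1][y], board[2][y]]
--     if player not in col:
--         return 1
--     for i in col:
--         if i != "" and i != player:
--             return 0
--     return col.count(player)+1
-- ===== SOURCE B (Python) =====
-- def calculateCol(board, pos, player):
--     y = pos[1]
--     s = 0
--     for r in range(3):
--         c = board[r][y]
--         s += 4 if c == player else (1 if c != "" else 0)
--     cnt, opp = divmod(s, 4)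
--     if cnt == 0:
--         return 1
--     if opp:
--         return 0
--     return cnt + 1
-- ===== Notes on version B (the rewrite author's own statement) =====
-- stated objective: alternative
-- what changed: Replaces A's column list with three scans (membership test, opponent loop, count) by an arithmetic encoding: each cell is mapped to a base-4 digit (player=4, other non-empty=1, empty=0), the digits are summed, and one divmod decodes the player count and the blocked flag.
import Mathlib
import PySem

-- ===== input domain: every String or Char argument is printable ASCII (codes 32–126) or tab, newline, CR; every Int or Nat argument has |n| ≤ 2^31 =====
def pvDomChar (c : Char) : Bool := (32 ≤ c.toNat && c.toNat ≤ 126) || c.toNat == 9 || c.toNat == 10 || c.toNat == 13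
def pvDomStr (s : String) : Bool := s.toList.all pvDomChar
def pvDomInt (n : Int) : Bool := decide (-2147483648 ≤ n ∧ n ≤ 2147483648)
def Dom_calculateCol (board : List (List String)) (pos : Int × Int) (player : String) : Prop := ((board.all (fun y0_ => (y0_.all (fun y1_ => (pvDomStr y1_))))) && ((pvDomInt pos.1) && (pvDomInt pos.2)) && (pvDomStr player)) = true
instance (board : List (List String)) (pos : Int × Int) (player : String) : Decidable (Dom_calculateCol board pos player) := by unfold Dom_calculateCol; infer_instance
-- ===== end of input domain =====

-- B encodes each cell as a base-4 digit and decodes the score from the digit sum with one divmod; objective: alternative.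

-- ===== PORT A =====
-- builds the column list, then three scans: membership test, opponent-search loop, count
def calculateCol (board : List (List String)) (pos : Int × Int) (player : String) : Int :=
  let y := pos.2
  match (PySem.List.pyGet? board 0).bind (fun r => PySem.List.pyGet? r y),
        (PySem.List.pyGet? board 1).bind (fun r => PySem.List.pyGet? r y),
        (PySem.List.pyGet? board 2).bind (fun r => PySem.List.pyGet? r y) with
  | some c0, some c1, some c2 =>
    let col := [c0, c1, c2]
    if player ∉ col then 1
    else if col.any (fun i => i ≠ "" && i ≠ player) then 0
    else (PySem.List.count col player : Int) + 1
  | _, _, _ => 0     -- unreachable under Pre_ (IndexError in Python)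

-- ===== PORT B =====
-- digit sum over range(3), then divmod decodes count and blocked flag
def calculateCol_alt (board : List (List String)) (pos : Int × Int) (player : String) : Int :=
  let y := pos.2
  let s? := (PySem.List.pyRange 0 3 1).foldl
    (fun (acc : Option Int) r =>
      acc.bind (fun s =>
        ((PySem.List.pyGet? board r).bind (fun row => PySem.List.pyGet? row y)).map
          (fun c => s + (if c = player then 4 else if c ≠ "" then 1 else 0))))
    (some 0)
  match s? with
  | none => 0     -- unreachable under Pre_ (IndexError in Python)
  | some s =>
    let cnt := PySem.Int.floordiv s 4
    let opp := PySem.Int.mod s 4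
    if cnt = 0 then 1
    else if opp ≠ 0 then 0
    else cnt + 1

-- ===== PRECONDITION & SPEC =====
-- Pre_ excludes exactly the inputs where Python A raises IndexError: the board must
-- have rows 0,1,2 and the column index pos[1] must be in Python range for each of them.
def Pre_calculateCol (board : List (List String)) (pos : Int × Int) (player : String) : Prop :=
  3 ≤ board.length ∧
  PySem.Raise.InRange (board.getD 0 []).length pos.2 ∧
  PySem.Raise.InRange (board.getD 1 []).length pos.2 ∧
  PySem.Raise.InRange (board.getD 2 []).length pos.2
instance (board : List (List String)) (pos : Int × Int) (player : String) : Decidable (Pre_calculateCol board pos player) := by unfold Pre_calculateCol; infer_instance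

def pvWitness_calculateCol : List (List String) × (Int × Int) × String :=
  ([["X", "O", ""], ["", "X", ""], ["O", "", "X"]], (0, 1), "X")

def Spec_calculateCol (board : List (List String)) (pos : Int × Int) (player : String) (out : Int) : Prop := out = calculateCol_alt board pos player
instance (board : List (List String)) (pos : Int × Int) (player : String) (out : Int) : Decidable (Spec_calculateCol board pos player out) := by unfold Spec_calculateCol; infer_instance

-- ===== CLAIM (what is proved, stated in full; the proofs are below) =====
def Claim_equal_calculateCol : Prop := ∀ (board : List (List String)) (pos : Int × Int) (player : String), Dom_calculateCol board pos player → Pre_calculateCol board pos player → Spec_calculateCol board pos player (calculateCol board pos player)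

-- ===== LEMMAS AND PROOFS =====

-- A's three scans agree with B's base-4 digit-sum decoding on any three cells
lemma cell_eq (a b c p : String) :
    (if p ∉ [a, b, c] then (1 : Int)
     else if [a, b, c].any (fun i => i ≠ "" && i ≠ p) then 0
     else (PySem.List.count [a, b, c] p : Int) + 1)
    =
    (let s : Int := ((0 + (if a = p then 4 else if a ≠ "" then 1 else 0))
                        + (if b = p then 4 else if b ≠ "" then 1 else 0))
                        + (if c = p then 4 else if c ≠ "" then 1 else 0)
     if PySem.Int.floordiv s 4 = 0 then 1
     else if PySem.Int.mod s 4 ≠ 0 then 0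
     else PySem.Int.floordiv s 4 + 1) := by
  by_cases ha : a = p <;> by_cases hb : b = p <;> by_cases hc : c = p <;>
    by_cases ea : a = "" <;> by_cases eb : b = "" <;> by_cases ec : c = "" <;>
      simp_all [PySem.List.count, PySem.Int.floordiv, PySem.Int.mod] <;>
        simp [eq_comm] <;> tauto

-- ===== VERDICT (by name: the statement is the Claim_ definition above) =====
theorem calculateCol_spec : Claim_equal_calculateCol := by
  intro board pos player _ hpre
  obtain ⟨hlen, h0, h1, h2⟩ := hpre
  -- Pre_ guarantees every cell access succeeds
  have g : ∀ i : Nat, i < 3 →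
      ∃ v, (PySem.List.pyGet? board (i : Int)).bind (fun r => PySem.List.pyGet? r pos.2) = some v := by
    intro i hi
    have hib : i < board.length := by omega
    have hr : PySem.List.pyGet? board (i : Int) = some board[i] := by
      rw [PySem.List.pyGet?_natCast]; exact List.getElem?_eq_getElem hib
    have hrow : board[i] = board.getD i [] := by
      simp [List.getD, hib]
    have hin : PySem.Raise.InRange board[i].length pos.2 := by
      rw [hrow]; interval_cases i <;> assumption
    have : PySem.List.pyGet? board[i] pos.2 ≠ none :=
      fun h => ((PySem.List.pyGet?_eq_none_iff _ _).mp h) hin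
    obtain ⟨v, hv⟩ := Option.ne_none_iff_exists'.mp this
    exact ⟨v, by rw [hr]; simpa using hv⟩
  obtain ⟨c0, e0⟩ := g 0 (by omega)
  obtain ⟨c1, e1⟩ := g 1 (by omega)
  obtain ⟨c2, e2⟩ := g 2 (by omega)
  norm_num at e0 e1 e2
  have hr3 : PySem.List.pyRange 0 3 1 = [0, 1, 2] := by decide
  unfold Spec_calculateCol calculateCol calculateCol_alt
  simp only [hr3, List.foldl, e0, e1, e2, Option.bind_some, Option.map_some]
  exact cell_eq c0 c1 c2 player
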